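-- pv_equiv track=rewrite | github.com/WoodenHeadoo/RIBOTIM | KNN/MRs.py | shuffleAttribute
-- ===== SOURCE A (Python) =====
-- def duplicateMatrix(original_matrix):
--     dup_matrix = []
--     for row in range(len(original_matrix)):
--         temp = []
--         for col in range(len(original_matrix[0])):
--             temp.append(original_matrix[row][col])
--         dup_matrix.append(temp)
--     return dup_matrix
--
-- def shuffleAttribute(original_matrix, shuffle_map):
--     shuffled_matrix = duplicateMatrix(original_matrix)
--     for row in range(len(shuffled_matrix)):
--         for col in range(len(shuffled_matrix[0]) - 1):  # the last column, label info, is removed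
--             dict_value = shuffle_map[col]
--             if not col == dict_value:
--                 shuffled_matrix[row][col] = original_matrix[row][dict_value]
--     return shuffled_matrix
-- ===== SOURCE B (Python) =====
-- def shuffleAttribute(original_matrix, shuffle_map):
--     if not original_matrix:
--         return []
--     cols = list(zip(*original_matrix))
--     if not cols:
--         return [[] for _ in original_matrix]
--     shuffled_cols = [cols[shuffle_map[c]] for c in range(len(cols) - 1)]
--     shuffled_cols.append(cols[-1])
--     return [list(r) for r in zip(*shuffled_cols)]
-- ===== Notes on version B (the rewrite author's own statement) =====
-- stated objective: alternative
-- what changed: B works column-major: it transposes the matrix with zip(*...), permutes the list of columns (shuffle_map entry for all but the last column, last column kept), and transposes back, instead of A's row-major copy-the-matrix-then-overwrite-cells double loop.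
-- outside the precondition, e.g. on shuffleAttribute([[1, 2], [3, 4, 5]], {0: -1}): A returns [[2, 2], [5, 4]], B returns [[2, 2], [4, 4]]
import Mathlib
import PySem

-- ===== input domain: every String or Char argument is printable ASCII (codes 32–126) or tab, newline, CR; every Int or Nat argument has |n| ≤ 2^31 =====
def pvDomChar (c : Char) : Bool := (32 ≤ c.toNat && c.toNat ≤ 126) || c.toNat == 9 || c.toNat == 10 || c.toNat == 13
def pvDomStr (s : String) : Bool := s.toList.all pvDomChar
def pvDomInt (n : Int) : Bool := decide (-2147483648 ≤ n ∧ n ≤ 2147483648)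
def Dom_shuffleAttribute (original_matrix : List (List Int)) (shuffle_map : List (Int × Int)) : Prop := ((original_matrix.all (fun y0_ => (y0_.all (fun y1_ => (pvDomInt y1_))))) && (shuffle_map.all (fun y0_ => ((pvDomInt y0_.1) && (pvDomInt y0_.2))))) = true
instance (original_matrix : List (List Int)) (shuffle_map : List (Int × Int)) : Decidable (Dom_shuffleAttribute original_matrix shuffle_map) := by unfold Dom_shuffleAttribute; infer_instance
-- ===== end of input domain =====

-- B works column-major: transpose with zip(*...), permute the column list (last column kept), transpose back — an alternative algorithm of the same cost as A's row-major copy-then-overwrite loops.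


-- ===== PORT A =====
-- 'original_matrix[0]' is only evaluated when the surrounding loop runs, i.e. the matrix is
-- nonempty, so '(pyGet? … 0).getD []' never takes its default on a reachable path; the other
-- '.getD' defaults are unreachable under Pre_ (which excludes A's IndexError/KeyError inputs).
def duplicateMatrix (original_matrix : List (List Int)) : List (List Int) :=
  (PySem.List.pyRange 0 (original_matrix.length : Int) 1).foldl
    (fun dup_matrix row =>
      dup_matrix ++
        [(PySem.List.pyRange 0 (((PySem.List.pyGet? original_matrix 0).getD []).length : Int) 1).foldl
          (fun temp col =>
            temp ++ [PySem.List.pyGetD ((PySem.List.pyGet? original_matrix row).getD []) col 0]) []])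
    []

def shuffleAttribute (original_matrix : List (List Int)) (shuffle_map : List (Int × Int)) : List (List Int) :=
  let shuffled_matrix := duplicateMatrix original_matrix
  (PySem.List.pyRange 0 (shuffled_matrix.length : Int) 1).foldl
    (fun s row =>
      (PySem.List.pyRange 0 ((((PySem.List.pyGet? s 0).getD []).length : Int) - 1) 1).foldl
        (fun s col =>
          let dict_value := ((PySem.Dict.ofList shuffle_map).get? col).getD 0
          if ¬ (col = dict_value) then
            PySem.List.pySetD s row
              (PySem.List.pySetD ((PySem.List.pyGet? s row).getD []) col
                (PySem.List.pyGetD ((PySem.List.pyGet? original_matrix row).getD []) dict_value 0))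
          else s)
        s)
    shuffled_matrix

-- ===== PORT B =====
-- zip(*matrix): columns of the matrix, truncated to the shortest row (exact Python zip semantics).
def pyZipCols (m : List (List Int)) : List (List Int) :=
  if h : m ≠ [] ∧ m.all (fun r => ¬ r.isEmpty) then
    (m.map (fun r => r.headD 0)) :: pyZipCols (m.map (fun r => r.tail))
  else []
termination_by (m.headD []).length
decreasing_by
  rcases m with _ | ⟨r0, rest⟩
  · exact absurd rfl h.1
  · have : ¬ r0.isEmpty := by
      have := h.2; simp only [List.all_cons, Bool.and_eq_true, decide_eq_true_eq] at this
      exact this.1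
    cases r0 with
    | nil => simp at this
    | cons a r => simp

def shuffleAttribute_alt (original_matrix : List (List Int)) (shuffle_map : List (Int × Int)) : List (List Int) :=
  match original_matrix with
  | [] => []
  | _ :: _ =>
    let cols := pyZipCols original_matrix
    if cols = [] then original_matrix.map (fun _ => ([] : List Int))
    else
      let shuffled_cols :=
        (PySem.List.pyRange 0 ((cols.length : Int) - 1) 1).map
          (fun c => (PySem.List.pyGet? cols (((PySem.Dict.ofList shuffle_map).get? c).getD 0)).getD [])
        ++ [(PySem.List.pyGet? cols (-1)).getD []]
      pyZipCols shuffled_cols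

-- ===== PRECONDITION & SPEC =====
-- Pre_ excludes the inputs where Python A raises (a row shorter than the first row, a missing
-- shuffle_map key, a mapped index out of range for some row) and, among ragged matrices with
-- extra-long rows that keep A from raising, those where some mapped index is negative or falls
-- beyond the first row's column count: there A reads the index against each row's OWN length —
-- an artefact of A's in-place per-row indexing that a column-based reading cannot reproduce.
def Pre_shuffleAttribute (original_matrix : List (List Int)) (shuffle_map : List (Int × Int)) : Prop :=
  (∀ row ∈ original_matrix, (original_matrix.headD []).length ≤ row.length) ∧
  ∀ col ∈ List.range ((original_matrix.headD []).length - 1),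
    (((PySem.Dict.ofList shuffle_map).get? (col : Int)).isSome ∧
     ((0 ≤ ((PySem.Dict.ofList shuffle_map).get? (col : Int)).getD 0 ∧
       ((PySem.Dict.ofList shuffle_map).get? (col : Int)).getD 0
         < ((original_matrix.headD []).length : Int)) ∨
      (-((original_matrix.headD []).length : Int)
         ≤ ((PySem.Dict.ofList shuffle_map).get? (col : Int)).getD 0 ∧
       ((PySem.Dict.ofList shuffle_map).get? (col : Int)).getD 0 < 0 ∧
       ∀ row ∈ original_matrix, row.length = (original_matrix.headD []).length)))
instance (original_matrix : List (List Int)) (shuffle_map : List (Int × Int)) : Decidable (Pre_shuffleAttribute original_matrix shuffle_map) := by unfold Pre_shuffleAttribute; infer_instance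

def pvWitness_shuffleAttribute : List (List Int) × (List (Int × Int)) :=
  ([[1, 2, 3], [4, 5, 6]], [(0, 1), (1, 0)])

def Spec_shuffleAttribute (original_matrix : List (List Int)) (shuffle_map : List (Int × Int)) (out : List (List Int)) : Prop := out = shuffleAttribute_alt original_matrix shuffle_map
instance (original_matrix : List (List Int)) (shuffle_map : List (Int × Int)) (out : List (List Int)) : Decidable (Spec_shuffleAttribute original_matrix shuffle_map out) := by unfold Spec_shuffleAttribute; infer_instance

-- ===== CLAIM (what is proved, stated in full; the proofs are below) =====
def Claim_equal_shuffleAttribute : Prop := ∀ (original_matrix : List (List Int)) (shuffle_map : List (Int × Int)), Dom_shuffleAttribute original_matrix shuffle_map → Pre_shuffleAttribute original_matrix shuffle_map → Spec_shuffleAttribute original_matrix shuffle_map (shuffleAttribute original_matrix shuffle_map)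

-- ===== LEMMAS AND PROOFS =====

def pvDup (n : Nat) (r : List Int) : List Int := (List.range n).map (fun (c : Nat) => PySem.List.pyGetD r (c:Int) 0)
def pvIdx (sm : List (Int × Int)) (n : Nat) (c : Nat) : Int :=
  if (c:Int) < (n:Int) - 1 then ((PySem.Dict.ofList sm).get? (c:Int)).getD 0 else (c:Int)
def pvRow (sm : List (Int × Int)) (n : Nat) (r : List Int) : List Int :=
  (List.range n).map (fun c => PySem.List.pyGetD r (pvIdx sm n c) 0)
-- Python's normalisation of an in-range (possibly negative) index against length n
def pvNorm (n : Nat) (i : Int) : Nat := if 0 ≤ i then i.toNat else n - (-i).toNat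

theorem map_range_getD {α β : Type} (l : List α) (d : α) (g : α → β) :
    (List.range l.length).map (fun k => g (l[k]?.getD d)) = l.map g := by
  apply List.ext_getElem
  · simp
  · intro i h1 h2
    simp only [List.length_map] at h2
    simp [List.getElem?_eq_getElem h2]

theorem dup_eq (m : List (List Int)) :
    duplicateMatrix m = m.map (pvDup ((m.headD []).length)) := by
  cases m with
  | nil => simp [duplicateMatrix, PySem.List.pyRange_one_eq_nil]
  | cons r0 rest =>
    unfold duplicateMatrix
    simp only [PySem.List.pyRange_zero_natCast, List.foldl_map,
      PySem.List.foldl_append_singleton_eq_map, List.nil_append]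
    have h0 : (PySem.List.pyGet? (r0 :: rest) 0).getD [] = r0 := by
      simp [PySem.List.pyGet?, PySem.List.pyIdx?]
    rw [h0]
    have := map_range_getD (r0 :: rest) [] (pvDup r0.length)
    simp only [List.headD_cons]
    rw [← this]
    apply List.map_congr_left
    intro k hk
    simp only [PySem.List.pyGet?_natCast]
    simp only [pvDup, PySem.List.pyGetD_natCast, List.getD_eq_getElem?_getD]

theorem set_map_range {α : Type} (n k : Nat) (_hk : k < n) (f : Nat → α) (x : α) :
    ((List.range n).map f).set k x = (List.range n).map (fun c => if c = k then x else f c) := by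
  apply List.ext_getElem
  · simp
  · intro i h1 h2
    by_cases hik : i = k
    · simp [hik]
    · simp [List.getElem_set, hik]
      exact fun h => absurd h.symm hik

theorem fold_set_comm (v w : Int → Int) :
    ∀ (L : List Int) (s : List (List Int)) (ρ : Nat), ρ < s.length →
    L.foldl (fun s c => if ¬(c = v c) then s.set ρ ((s[ρ]?.getD []).set c.toNat (w c)) else s) s
      = s.set ρ (L.foldl (fun t c => if ¬(c = v c) then t.set c.toNat (w c) else t) (s[ρ]?.getD [])) := by
  intro L
  induction L with
  | nil =>
    intro s ρ h
    simp [List.getElem?_eq_getElem h]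
  | cons c L ih =>
    intro s ρ h
    simp only [List.foldl_cons]
    by_cases hc : c = v c
    · rw [if_neg (not_not_intro hc), if_neg (not_not_intro hc)]
      exact ih s ρ h
    · rw [if_pos hc, if_pos hc, ih _ ρ (by simpa using h),
        List.getElem?_set_self (by simpa using h)]
      simp [List.set_set]

theorem row_fold (v w : Int → Int) (n : Nat) (t0 : Nat → Int) :
    ∀ (k : Nat), k ≤ n →
    (PySem.List.pyRange 0 (k:Int) 1).foldl
        (fun t c => if ¬(c = v c) then t.set c.toNat (w c) else t) ((List.range n).map t0)
      = (List.range n).map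
          (fun c => if c < k then (if (c:Int) = v (c:Int) then t0 c else w (c:Int)) else t0 c) := by
  intro k
  induction k with
  | zero =>
    intro _
    simp [PySem.List.pyRange_one_eq_nil]
  | succ k ih =>
    intro _
    have hcast : ((k+1 : Nat) : Int) = (k:Int) + 1 := by push_cast; ring
    rw [hcast, PySem.List.pyRange_one_succ_right (by positivity), List.foldl_append,
      ih (by omega)]
    simp only [List.foldl_cons, List.foldl_nil]
    by_cases hc : (k:Int) = v (k:Int)
    · rw [if_neg (not_not_intro hc)]
      apply List.map_congr_left
      intro c hc'
      simp only [List.mem_range] at hc'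
      by_cases hck : c = k
      · subst hck
        rw [if_neg (lt_irrefl _), if_pos (Nat.lt_succ_self _), if_pos hc]
      · by_cases hlt : c < k <;> simp [hlt] <;> omega
    · rw [if_pos hc, Int.toNat_natCast, set_map_range n k (by omega)]
      apply List.map_congr_left
      intro c hc'
      simp only [List.mem_range] at hc'
      by_cases hck : c = k
      · subst hck
        simp [hc]
      · by_cases hlt : c < k <;> simp [hlt] <;> omega

theorem pyRange_pred (n : Nat) :
    PySem.List.pyRange 0 ((n:Int) - 1) = PySem.List.pyRange 0 ((n - 1 : Nat) : Int) := by
  cases n with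
  | zero => simp [PySem.List.pyRange_one_eq_nil]
  | succ k => congr 1; push_cast; ring

theorem inner_step (sm : List (Int × Int)) (m : List (List Int)) (n : Nat)
    (s : List (List Int)) (k : Nat) (r : List Int)
    (hk : k < s.length)
    (h0 : ((PySem.List.pyGet? s 0).getD []).length = n)
    (hsk : s[k]? = some (pvDup n r))
    (hmr : (PySem.List.pyGet? m ((k : Nat) : Int)).getD [] = r) :
    (PySem.List.pyRange 0 ((((PySem.List.pyGet? s 0).getD []).length : Int) - 1) 1).foldl
        (fun s col =>
          let dict_value := ((PySem.Dict.ofList sm).get? col).getD 0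
          if ¬ (col = dict_value) then
            PySem.List.pySetD s ((k : Nat) : Int)
              (PySem.List.pySetD ((PySem.List.pyGet? s ((k : Nat) : Int)).getD []) col
                (PySem.List.pyGetD ((PySem.List.pyGet? m ((k : Nat) : Int)).getD []) dict_value 0))
          else s)
        s
      = s.set k (pvRow sm n r) := by
  rw [h0, pyRange_pred]
  rw [PySem.List.pyGet?_natCast] at hmr
  rw [PySem.List.foldl_congr_mem _ _
    (fun s col => if ¬ (col = ((PySem.Dict.ofList sm).get? col).getD 0) then
        s.set k ((s[k]?.getD []).set col.toNat
          (PySem.List.pyGetD r (((PySem.Dict.ofList sm).get? col).getD 0) 0))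
      else s) _ ?_]
  · rw [fold_set_comm (fun c => ((PySem.Dict.ofList sm).get? c).getD 0)
      (fun c => PySem.List.pyGetD r (((PySem.Dict.ofList sm).get? c).getD 0) 0) _ s k hk]
    congr 1
    rw [hsk]
    simp only [Option.getD_some, pvDup]
    rw [row_fold _ _ n _ (n-1) (Nat.sub_le n 1)]
    unfold pvRow pvIdx
    apply List.map_congr_left
    intro c hc
    simp only [List.mem_range] at hc
    by_cases h1 : c < n - 1
    · rw [if_pos h1, if_pos (show (c:Int) < (n:Int) - 1 by omega)]
      by_cases h2 : (c:Int) = ((PySem.Dict.ofList sm).get? (c:Int)).getD 0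
      · rw [if_pos h2, ← h2]
      · rw [if_neg h2]
    · rw [if_neg h1, if_neg (show ¬((c:Int) < (n:Int) - 1) by omega)]
  · intro acc col hcol
    have hcnn : (0:Int) ≤ col := (PySem.List.mem_pyRange_one.mp hcol).1
    simp only [hmr, PySem.List.pyGet?_natCast, PySem.List.pySetD_natCast,
      PySem.List.pySetD_of_nonneg _ _ hcnn]

theorem outer_fold (sm : List (Int × Int)) (m : List (List Int)) :
    ∀ (k : Nat), k ≤ m.length →
    (PySem.List.pyRange 0 (k:Int) 1).foldl
        (fun s row =>
          (PySem.List.pyRange 0 ((((PySem.List.pyGet? s 0).getD []).length : Int) - 1) 1).foldl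
            (fun s col =>
              let dict_value := ((PySem.Dict.ofList sm).get? col).getD 0
              if ¬ (col = dict_value) then
                PySem.List.pySetD s row
                  (PySem.List.pySetD ((PySem.List.pyGet? s row).getD []) col
                    (PySem.List.pyGetD ((PySem.List.pyGet? m row).getD []) dict_value 0))
              else s) s)
        (m.map (pvDup ((m.headD []).length)))
      = (m.take k).map (pvRow sm ((m.headD []).length))
          ++ (m.drop k).map (pvDup ((m.headD []).length)) := by
  intro k
  induction k with
  | zero =>
    intro _
    simp [PySem.List.pyRange_one_eq_nil]
  | succ k ih =>
    intro hk
    have hklt : k < m.length := by omega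
    have hcast : ((k+1 : Nat) : Int) = (k:Int) + 1 := by push_cast; ring
    rw [hcast, PySem.List.pyRange_one_succ_right (by positivity), List.foldl_append,
      ih (by omega)]
    simp only [List.foldl_cons, List.foldl_nil]
    set n := (m.headD []).length with hn
    set sk := (m.take k).map (pvRow sm n) ++ (m.drop k).map (pvDup n) with hsk'
    have htlen : ((m.take k).map (pvRow sm n)).length = k := by
      simp [List.length_take]; omega
    have hlen : sk.length = m.length := by
      simp [hsk', List.length_take, List.length_drop]; omega
    have helem : ∀ x ∈ sk, x.length = n := by
      intro x hx
      rcases List.mem_append.mp hx with h | h <;>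
        rcases List.mem_map.mp h with ⟨y, _, rfl⟩ <;> simp [pvRow, pvDup]
    have h0 : ((PySem.List.pyGet? sk 0).getD []).length = n := by
      have hne : 0 < sk.length := by omega
      rw [show (0:Int) = ((0:Nat):Int) from rfl, PySem.List.pyGet?_natCast,
        List.getElem?_eq_getElem hne]
      exact helem _ (List.getElem_mem hne)
    have hsk : sk[k]? = some (pvDup n (m[k]'hklt)) := by
      rw [hsk', List.getElem?_append_right (by omega), htlen]
      rw [List.drop_eq_getElem_cons hklt, List.map_cons]
      simp
    have hmr : (PySem.List.pyGet? m ((k:Nat):Int)).getD [] = (m[k]'hklt) := by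
      rw [PySem.List.pyGet?_natCast, List.getElem?_eq_getElem hklt]
      rfl
    rw [inner_step sm m n sk k (m[k]'hklt) (by omega) h0 hsk hmr]
    rw [hsk', List.set_append_right _ _ (by omega), htlen, Nat.sub_self,
      List.drop_eq_getElem_cons hklt, List.map_cons, List.set_cons_zero,
      List.take_add_one, List.getElem?_eq_getElem hklt, List.map_append]
    simp

-- A computes the row-wise gather pvRow (over the first row's column count), unconditionally.
theorem A_char (m : List (List Int)) (sm : List (Int × Int)) :
    shuffleAttribute m sm = m.map (pvRow sm ((m.headD []).length)) := by
  cases m with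
  | nil => rfl
  | cons r0 rest =>
    simp only [shuffleAttribute, dup_eq]
    rw [show ((((r0 :: rest).map (pvDup (((r0 :: rest) : List (List Int)).headD []).length)).length : Nat) : Int)
        = (((r0 :: rest) : List (List Int)).length : Int) by simp]
    rw [outer_fold sm (r0 :: rest) (r0 :: rest).length (le_refl _)]
    simp only [List.take_length, List.drop_length, List.map_nil, List.append_nil]

-- zip(*m) of a nonempty matrix whose first row is (one of) the shortest is the list of its
-- first-row-many columns.
theorem zip_char : ∀ (n : Nat) (r0 : List Int) (rest : List (List Int)),
    r0.length = n → (∀ r ∈ rest, n ≤ r.length) →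
    pyZipCols (r0 :: rest)
      = (List.range n).map (fun j => (r0 :: rest).map (fun r => r.getD j 0)) := by
  intro n
  induction n with
  | zero =>
    intro r0 rest h0 _
    have hr0 : r0 = [] := List.length_eq_zero_iff.mp h0
    subst hr0
    rw [pyZipCols, dif_neg]
    · simp
    · rintro ⟨-, hall⟩
      simp at hall
  | succ n ih =>
    intro r0 rest h0 hge
    have hall : (r0 :: rest : List (List Int)).all (fun r => ¬ r.isEmpty) := by
      simp only [List.all_eq_true, decide_eq_true_eq]
      intro r hr
      rcases List.mem_cons.mp hr with rfl | hr'
      · cases r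
        · simp at h0
        · simp
      · have := hge r hr'
        cases r
        · simp at this
        · simp
    rw [pyZipCols, dif_pos ⟨by simp, hall⟩, List.map_cons]
    rw [show List.map (fun r => r.tail) (r0 :: rest) = r0.tail :: rest.map (fun r => r.tail)
      from rfl]
    rw [ih r0.tail (rest.map (fun r => r.tail))
      (by cases r0 with
          | nil => simp at h0
          | cons a t => simpa using h0)
      (by intro r hr
          obtain ⟨y, hy, rfl⟩ := List.mem_map.mp hr
          have := hge y hy
          cases y with
          | nil => simp at this
          | cons a t => simp at this ⊢; omega)]
    rw [List.range_succ_eq_map, List.map_cons, List.map_map]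
    congr 1
    · rw [List.map_cons]
      congr 1
      · cases r0 <;> simp
      · apply List.map_congr_left
        intro r _
        cases r <;> simp
    · apply List.map_congr_left
      intro j _
      simp only [Function.comp_apply, List.map_cons, List.map_map]
      congr 1
      · cases r0 <;> simp
      · apply List.map_congr_left
        intro r _
        cases r <;> simp

-- an in-range Python index reads position pvNorm n i of any list of length n
theorem pyGet_norm {α : Type} (n : Nat) (i : Int) (hlo : -(n:Int) ≤ i) (_hhi : i < (n:Int))
    (l : List α) (hl : l.length = n) :
    PySem.List.pyGet? l i = l[pvNorm n i]? := by
  by_cases h0 : 0 ≤ i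
  · rw [PySem.List.pyGet?_of_nonneg l h0, pvNorm, if_pos h0]
  · have hnorm : pvNorm n i = n - (-i).toNat := by rw [pvNorm, if_neg h0]
    have hk : i = -(((-i).toNat : Nat) : Int) := by omega
    rw [hnorm, hk, PySem.List.pyGet?_neg_natCast l _ (by omega) (by omega), hl]
    have hmax : max (-i) 0 = -i := by omega
    simp [hmax]

theorem pvNorm_lt (n : Nat) (i : Int) (_hlo : -(n:Int) ≤ i) (hhi : i < (n:Int)) (hn : 0 < n) :
    pvNorm n i < n := by
  unfold pvNorm
  split_ifs <;> omega

theorem pyGetD_norm (n : Nat) (i : Int) (hlo : -(n:Int) ≤ i) (hhi : i < (n:Int))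
    (l : List Int) (hl : l.length = n) :
    PySem.List.pyGetD l i 0 = l.getD (pvNorm n i) 0 := by
  have h := pyGet_norm n i hlo hhi l hl
  simp only [PySem.List.pyGetD, h, List.getD_eq_getElem?_getD]

-- B also computes the row-wise gather pvRow, under Pre_.
theorem B_char_core (sm : List (Int × Int)) (r0 : List Int) (rest : List (List Int)) (n : Nat)
    (hn0 : r0.length = n)
    (hge : ∀ r ∈ (r0 :: rest : List (List Int)), n ≤ r.length)
    (hdvall : ∀ col ∈ List.range (n - 1),
      (0 ≤ ((PySem.Dict.ofList sm).get? (col : Int)).getD 0 ∧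
       ((PySem.Dict.ofList sm).get? (col : Int)).getD 0 < (n : Int)) ∨
      (-(n : Int) ≤ ((PySem.Dict.ofList sm).get? (col : Int)).getD 0 ∧
       ((PySem.Dict.ofList sm).get? (col : Int)).getD 0 < 0 ∧
       ∀ r ∈ (r0 :: rest : List (List Int)), r.length = n)) :
    shuffleAttribute_alt (r0 :: rest) sm = (r0 :: rest).map (pvRow sm n) := by
  have hcols : pyZipCols (r0 :: rest)
      = (List.range n).map (fun j => (r0 :: rest).map (fun r => r.getD j 0)) :=
    zip_char n r0 rest hn0 (fun r hr => hge r (List.mem_cons_of_mem _ hr))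
  unfold shuffleAttribute_alt
  rcases Nat.eq_zero_or_pos n with hz | hpos
  · -- no columns: both sides are a list of empty rows
    have hce : pyZipCols (r0 :: rest) = [] := by rw [hcols, hz]; rfl
    rw [hce]
    simp only [if_pos]
    apply List.map_congr_left
    intro r _
    simp [pvRow, hz]
  · -- at least one column
    obtain ⟨k, rfl⟩ : ∃ k, n = k + 1 := ⟨n - 1, by omega⟩
    have hclen : (pyZipCols (r0 :: rest)).length = k + 1 := by rw [hcols]; simp
    have hcne : ¬ (pyZipCols (r0 :: rest) = []) := by
      intro h; rw [h] at hclen; simp at hclen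
    simp only [if_neg hcne]
    rw [hclen]
    have hkey : ∀ c : Nat, c < k →
        -((k+1 : Nat):Int) ≤ ((PySem.Dict.ofList sm).get? (c:Int)).getD 0 ∧
        ((PySem.Dict.ofList sm).get? (c:Int)).getD 0 < ((k+1 : Nat):Int) := by
      intro c hc
      rcases hdvall c (List.mem_range.mpr (by omega)) with h | h
      · exact ⟨by push_cast; omega, h.2⟩
      · exact ⟨h.1, by push_cast; omega⟩
    have hcol_get : ∀ (i : Int), -((k+1 : Nat):Int) ≤ i → i < ((k+1 : Nat):Int) →
        (PySem.List.pyGet? (pyZipCols (r0 :: rest)) i).getD []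
          = (r0 :: rest).map (fun r => r.getD (pvNorm (k+1) i) 0) := by
      intro i h1 h2
      rw [pyGet_norm (k+1) i h1 h2 _ hclen, hcols]
      rw [List.getElem?_map, List.getElem?_range (pvNorm_lt (k+1) i h1 h2 hpos)]
      rfl
    rw [pyRange_pred, PySem.List.pyRange_zero_natCast]
    simp only [Nat.add_sub_cancel]
    have hbody : (List.range k).map
          ((fun c => (PySem.List.pyGet? (pyZipCols (r0 :: rest))
              (((PySem.Dict.ofList sm).get? c).getD 0)).getD []) ∘ (Nat.cast : Nat → Int))
          ++ [(PySem.List.pyGet? (pyZipCols (r0 :: rest)) (-1)).getD []]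
        = (List.range (k+1)).map
            (fun c => (r0 :: rest).map (fun r => PySem.List.pyGetD r (pvIdx sm (k+1) c) 0)) := by
      rw [List.range_succ, List.map_append, List.map_cons, List.map_nil]
      congr 1
      · apply List.map_congr_left
        intro c hc
        have hc' := List.mem_range.mp hc
        have hdv := hkey c hc'
        simp only [Function.comp_apply]
        rw [hcol_get _ hdv.1 hdv.2]
        apply List.map_congr_left
        intro r hr
        rw [show pvIdx sm (k+1) c = ((PySem.Dict.ofList sm).get? (c:Int)).getD 0 by
          unfold pvIdx; rw [if_pos (by push_cast; omega)]]
        rcases hdvall c (List.mem_range.mpr (by omega)) with hcase | hcase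
        · rw [PySem.List.pyGetD_of_nonneg r 0 hcase.1, pvNorm, if_pos hcase.1]
        · rw [pyGetD_norm (k+1) _ hcase.1 (by push_cast; omega) r (hcase.2.2 r hr)]
      · rw [hcol_get (-1) (by push_cast; omega) (by push_cast; omega)]
        congr 1
        apply List.map_congr_left
        intro r _
        rw [show pvIdx sm (k+1) k = ((k : Nat) : Int) by
          unfold pvIdx; rw [if_neg (by push_cast; omega)]]
        rw [PySem.List.pyGetD_of_nonneg r 0 (by positivity)]
        unfold pvNorm
        norm_num
    rw [List.map_map, hbody]
    -- transpose the gathered columns back into rows: every column has (r0::rest).length entries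
    rw [List.range_succ_eq_map, List.map_cons]
    rw [zip_char ((r0 :: rest : List (List Int)).length) _ _ (by simp)
      (by intro col hcol
          rcases List.mem_map.mp hcol with ⟨c, _, rfl⟩
          simp)]
    rw [show (List.map (fun r => PySem.List.pyGetD r (pvIdx sm (k + 1) 0) 0) (r0 :: rest) ::
          List.map (fun c => List.map (fun r => PySem.List.pyGetD r (pvIdx sm (k + 1) c) 0) (r0 :: rest))
            (List.map Nat.succ (List.range k)))
        = List.map (fun c => List.map (fun r => PySem.List.pyGetD r (pvIdx sm (k + 1) c) 0) (r0 :: rest))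
            (List.range (k+1)) from by rw [List.range_succ_eq_map]; rfl]
    rw [← map_range_getD (r0 :: rest) [] (pvRow sm (k+1))]
    apply List.map_congr_left
    intro i hi
    have hilt := List.mem_range.mp hi
    rw [List.map_map]
    unfold pvRow
    apply List.map_congr_left
    intro c _
    simp only [Function.comp_apply]
    rw [List.getD_eq_getElem?_getD, List.getElem?_map, List.getElem?_eq_getElem hilt]
    rfl

theorem B_char (m : List (List Int)) (sm : List (Int × Int))
    (hpre : Pre_shuffleAttribute m sm) :
    shuffleAttribute_alt m sm = m.map (pvRow sm ((m.headD []).length)) := by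
  rcases m with _ | ⟨r0, rest⟩
  · rfl
  · have hmn : ((r0 :: rest : List (List Int)).headD []).length = r0.length := by simp
    rw [hmn]
    exact B_char_core sm r0 rest r0.length rfl
      (by intro r hr; rw [← hmn]; exact hpre.1 r hr)
      (by intro col hcol
          have h := (hpre.2 col (by simpa using hcol)).2
          simpa using h)

-- ===== VERDICT (by name: the statement is the Claim_ definition above) =====
theorem shuffleAttribute_spec : Claim_equal_shuffleAttribute := by
  intro m sm _ hpre
  show shuffleAttribute m sm = shuffleAttribute_alt m sm
  rw [A_char, B_char m sm hpre]
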